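-- pv_equiv track=rewrite | github.com/kmus1232/Algorithm | python/kakao_표현_가능한_이진트리.py | solution
-- ===== SOURCE A (Python) =====
-- DUMMY = 0
--
-- NODE = 1
--
-- def make_binary_tree(n: int) -> str:  # ex) '0011010'
--     bn = bin(n)[2:]
--     for l in [1, 3, 7, 15, 31, 63]:
--         if len(bn) <= l:
--             bn = bn.zfill(l)
--             return bn
--
-- def check(s: str, l, r, level) -> (bool, int):
--     if l == r:
--         return (True, DUMMY if s[l] == "0" else NODE)
--
--     m = (l + r) // 2
--     lcheck = check(s, l, m - 1, level + 1)
--     rcheck = check(s, m + 1, r, level + 1)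
--
--     if not (lcheck[0] and rcheck[0]):
--         return (False, -1)
--
--     if s[m] == "0":
--         if level == 0 or (lcheck[1] == NODE or rcheck[1] == NODE):
--             # 더미 노드는 루트 노드가 될 수 없으며, 진짜 노드를 자식으로 가질 수 없다
--             return (False, -1)
--         else:
--             return (True, DUMMY)
--     else:
--         return (True, NODE)
--
-- def solution(numbers):
--     ans = []
--     for n in numbers:
--         bin_tree = make_binary_tree(n)
--         check_result = check(bin_tree, 0, len(bin_tree) - 1, 0)[0]
--         if check_result:
--             ans.append(1)
--         else:
--             ans.append(0)
--     return ans
-- ===== SOURCE B (Python) =====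
-- def make_binary_tree(n: int) -> str:
--     bn = bin(n)[2:]
--     for l in [1, 3, 7, 15, 31, 63]:
--         if len(bn) <= l:
--             bn = bn.zfill(l)
--             return bn
--
-- def solution(numbers):
--     ans = []
--     for n in numbers:
--         s = make_binary_tree(n)
--         N = len(s)
--         ok = not (N > 1 and s[N // 2] == "0")
--         h = 1
--         while ok and 2 * h <= N:
--             for i in range(2 * h - 1, N, 4 * h):
--                 if s[i] == "0" and (s[i - h] != "0" or s[i + h] != "0"):
--                     ok = False
--                     break
--             h *= 2
--         ans.append(1 if ok else 0)
--     return ans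
-- ===== Notes on version B (the rewrite author's own statement) =====
-- stated objective: faster
-- what changed: Replaces the recursive range-splitting validity check (which threads (ok, node/dummy) tuples through every subtree) by two flat index loops over the in-order layout: for each level the internal nodes sit at i = 2h-1, 2h-1+4h, ... with children at i-h and i+h, so a node-by-node scan plus a single root test decides validity without recursion.
import Mathlib
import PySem

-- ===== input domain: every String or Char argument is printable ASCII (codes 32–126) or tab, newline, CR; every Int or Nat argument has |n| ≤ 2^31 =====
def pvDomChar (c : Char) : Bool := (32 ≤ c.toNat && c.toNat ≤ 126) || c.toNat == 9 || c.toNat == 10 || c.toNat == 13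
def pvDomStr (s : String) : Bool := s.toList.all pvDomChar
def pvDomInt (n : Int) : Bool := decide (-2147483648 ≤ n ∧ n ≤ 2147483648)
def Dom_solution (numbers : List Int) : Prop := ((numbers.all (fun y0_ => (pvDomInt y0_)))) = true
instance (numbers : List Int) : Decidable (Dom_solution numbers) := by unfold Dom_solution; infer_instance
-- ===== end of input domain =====

-- B replaces A's recursive range-splitting check by two flat index loops (per level, per node) over
-- the in-order tree layout; no recursion or tuple threading (measured constant-factor speedup).

-- ===== PORT A =====

-- bin(m) digits for m > 0 (bin(0)[2:] = "0" is handled in pvBinTail)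
def pvNatBits (m : Nat) : List Char :=
  if m = 0 then [] else pvNatBits (m / 2) ++ [if m % 2 = 1 then '1' else '0']
decreasing_by exact Nat.div_lt_self (by omega) (by omega)

-- bin(n)[2:]  ('-0b101'[2:] = "b101": Python keeps the 'b' for negative n)
def pvBinTail (n : Int) : List Char :=
  if n < 0 then 'b' :: (if n = 0 then ['0'] else pvNatBits (-n).toNat)
  else if n = 0 then ['0'] else pvNatBits n.toNat

-- A's for-loop over [1,3,7,15,31,63]: first l with len(bn) <= l wins; falling off the end is
-- Python's implicit 'return None'
def pvPadTree (bn : List Char) : List Int → Option (List Char)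
  | [] => none
  | l :: ls => if (bn.length : Int) ≤ l then some (PySem.Chars.zfill bn l) else pvPadTree bn ls

def make_binary_tree (n : Int) : Option (List Char) :=
  pvPadTree (pvBinTail n) [1, 3, 7, 15, 31, 63]

-- A's recursive check; fuel only makes the recursion total (the calls 'solution' makes never
-- exhaust it; on l > r Python's check never terminates).  s[..] via pyGetD: every index reached
-- from 'solution' is in range.
def pvCheck (s : List Char) (fuel : Nat) (l r level : Int) : Bool × Int :=
  match fuel with
  | 0 => (false, -1)
  | fuel + 1 =>
    if l = r then (true, if PySem.List.pyGetD s l ' ' == '0' then 0 else 1)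
    else
      let m := PySem.Int.floordiv (l + r) 2
      let lc := pvCheck s fuel l (m - 1) (level + 1)
      let rc := pvCheck s fuel (m + 1) r (level + 1)
      if !(lc.1 && rc.1) then (false, -1)
      else if PySem.List.pyGetD s m ' ' == '0' then
        if level = 0 ∨ lc.2 = 1 ∨ rc.2 = 1 then (false, -1) else (true, 0)
      else (true, 1)

def solution (numbers : List Int) : List Int :=
  numbers.foldl (fun ans n =>
    match make_binary_tree n with
    | some t => ans ++ [if (pvCheck t t.length 0 ((t.length : Int) - 1) 0).1 then 1 else 0]
    | none => ans ++ [0]   -- unreachable on Dom_solution (Python raises TypeError on len(None))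
  ) []

-- ===== PORT B =====

-- B's inner 'for i in range(2h-1, N, 4h)' with break: one level of internal nodes
def pvInner (s : List Char) (h : Int) : List Int → Bool
  | [] => true
  | i :: rest =>
    if PySem.List.pyGetD s i ' ' == '0' &&
       (!(PySem.List.pyGetD s (i - h) ' ' == '0') || !(PySem.List.pyGetD s (i + h) ' ' == '0')) then
      false
    else pvInner s h rest

-- B's 'while ok and 2*h <= N' with h doubling; fuel ≥ log2 N suffices, solution_alt passes N
def pvOuter (s : List Char) (N : Int) (fuel : Nat) (ok : Bool) (h : Int) : Bool :=
  match fuel with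
  | 0 => ok
  | fuel + 1 =>
    if ok && decide (2 * h ≤ N) then
      pvOuter s N fuel (pvInner s h (PySem.List.pyRange (2 * h - 1) N (4 * h))) (2 * h)
    else ok

def solution_alt (numbers : List Int) : List Int :=
  numbers.foldl (fun ans n =>
    match make_binary_tree n with
    | some t =>
      let N : Int := t.length
      let ok := !(decide (1 < N) && (PySem.List.pyGetD t (PySem.Int.floordiv N 2) ' ' == '0'))
      ans ++ [if pvOuter t N t.length ok 1 then 1 else 0]
    | none => ans ++ [0]   -- unreachable on Dom_solution (Python raises TypeError on len(None))
  ) []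

-- ===== PRECONDITION & SPEC =====
def Spec_solution (numbers : List Int) (out : List Int) : Prop := out = solution_alt numbers
instance (numbers : List Int) (out : List Int) : Decidable (Spec_solution numbers out) := by unfold Spec_solution; infer_instance

-- ===== CLAIM (what is proved, stated in full; the proofs are below) =====
def Claim_equal_solution : Prop := ∀ (numbers : List Int), Dom_solution numbers → Spec_solution numbers (solution numbers)

-- ===== LEMMAS AND PROOFS =====

-- proof-only helpers: per-node guard, subtree invariant, and the value pvCheck's Bool reduces to
def pvP (s : List Char) (h i : Nat) : Bool :=
  !(s.getD i ' ' == '0') || (s.getD (i - h) ' ' == '0' && s.getD (i + h) ' ' == '0')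

def pvGS (s : List Char) : Nat → Nat → Bool
  | 0, _ => true
  | d + 1, l => pvGS s d l && pvGS s d (l + 2 ^ (d + 1)) && pvP s (2 ^ d) (l + 2 ^ (d + 1) - 1)

def pvB (s : List Char) (d l : Nat) (lvl : Int) : Bool :=
  pvGS s d l && (decide (lvl ≠ 0) || decide (d = 0) || !(s.getD (l + 2 ^ d - 1) ' ' == '0'))

theorem pvGS_iff (s : List Char) (d : Nat) : ∀ l : Nat, pvGS s d l = true ↔
    ∀ t j : Nat, 1 ≤ t → t ≤ d → j < 2 ^ (d - t) →
      pvP s (2 ^ (t - 1)) (l + 2 ^ t - 1 + j * 2 ^ (t + 1)) = true := by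
  induction d with
  | zero => intro l; simp [pvGS]; intro t j h1 h2; omega
  | succ d ih =>
    intro l
    simp only [pvGS, Bool.and_eq_true, ih]
    constructor
    · rintro ⟨⟨hl, hr⟩, hm⟩ t j h1 h2 hj
      rcases Nat.lt_or_ge t (d + 1) with ht | ht
      · -- t ≤ d
        have ht' : t ≤ d := by omega
        have hpow : 2 ^ (d - t) * 2 ^ (t + 1) = 2 ^ (d + 1) := by
          rw [← pow_add]; congr 1; omega
        rcases Nat.lt_or_ge j (2 ^ (d - t)) with hj' | hj'
        · have := hl t j h1 ht' hj'
          have hdt : d + 1 - t = (d - t) + 1 := by omega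
          exact this
        · have hj2 : j - 2 ^ (d - t) < 2 ^ (d - t) := by
            have : j < 2 ^ (d + 1 - t) := hj
            have h2' : 2 ^ (d + 1 - t) = 2 * 2 ^ (d - t) := by
              rw [← pow_succ']; congr 1; omega
            omega
          have := hr t (j - 2 ^ (d - t)) h1 ht' hj2
          have harith : l + 2 ^ (d + 1) + 2 ^ t - 1 + (j - 2 ^ (d - t)) * 2 ^ (t + 1)
              = l + 2 ^ t - 1 + j * 2 ^ (t + 1) := by
            have hmul : (j - 2 ^ (d - t)) * 2 ^ (t + 1) + 2 ^ (d - t) * 2 ^ (t + 1) = j * 2 ^ (t + 1) := by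
              rw [← Nat.add_mul]; congr 1; omega
            have h1p : (1:Nat) ≤ 2 ^ t := Nat.one_le_two_pow
            omega
          rw [harith] at this
          exact this
      · -- t = d + 1, j = 0
        have ht1 : t = d + 1 := by omega
        subst ht1
        have hj0 : j = 0 := by simpa using hj
        subst hj0
        simpa [Nat.one_le_two_pow] using hm
    · intro hall
      refine ⟨⟨fun t j h1 h2 hj => ?_, fun t j h1 h2 hj => ?_⟩, ?_⟩
      · exact hall t j h1 (by omega) (by
          have : d + 1 - t = (d - t) + 1 := by omega
          rw [this]; calc j < 2 ^ (d - t) := hj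
                        _ ≤ 2 ^ (d - t + 1) := Nat.pow_le_pow_right (by omega) (by omega))
      · have hpow : 2 ^ (d - t) * 2 ^ (t + 1) = 2 ^ (d + 1) := by
          rw [← pow_add]; congr 1; omega
        have := hall t (j + 2 ^ (d - t)) h1 (by omega) (by
          have h2' : 2 ^ (d + 1 - t) = 2 * 2 ^ (d - t) := by
            rw [← pow_succ']; congr 1; omega
          omega)
        have harith : l + 2 ^ t - 1 + (j + 2 ^ (d - t)) * 2 ^ (t + 1)
            = l + 2 ^ (d + 1) + 2 ^ t - 1 + j * 2 ^ (t + 1) := by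
          have : (j + 2 ^ (d - t)) * 2 ^ (t + 1) = j * 2 ^ (t + 1) + 2 ^ (d + 1) := by
            rw [Nat.add_mul, hpow]
          have h1p : (1:Nat) ≤ 2 ^ t := Nat.one_le_two_pow
          omega
        rw [harith] at this
        exact this
      · have := hall (d + 1) 0 (by omega) (le_refl _) (by simp)
        simpa [Nat.one_le_two_pow] using this

theorem pvCheck_eq (s : List Char) (d : Nat) : ∀ (l : Nat) (lvl : Int) (fuel : Nat),
    d < fuel → 0 ≤ lvl → l + 2 ^ (d + 1) - 1 ≤ s.length →
    pvCheck s fuel ↑l ↑(l + 2 ^ (d + 1) - 2) lvl =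
      (pvB s d l lvl,
       if pvB s d l lvl then (if s.getD (l + 2 ^ d - 1) ' ' == '0' then (0 : Int) else 1) else -1) := by
  induction d with
  | zero =>
    intro l lvl fuel hf hlvl hb
    cases fuel with
    | zero => omega
    | succ f =>
      have hr : l + 2 ^ (0 + 1) - 2 = l := by omega
      rw [hr]
      simp [pvCheck, pvB, pvGS]
  | succ d ih =>
    intro l lvl fuel hf hlvl hb
    cases fuel with
    | zero => omega
    | succ f =>
      have hp : 2 ^ (d + 1 + 1) = 2 ^ (d + 1) + 2 ^ (d + 1) := by ring
      have hp1 : 1 ≤ 2 ^ (d + 1) := Nat.one_le_two_pow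
      have hp2 : 1 ≤ 2 ^ d := Nat.one_le_two_pow
      have hpd : 2 ^ (d + 1) = 2 ^ d + 2 ^ d := by ring
      have hne : (↑l : Int) ≠ ↑(l + 2 ^ (d + 1 + 1) - 2) := by omega
      have hm : PySem.Int.floordiv (↑l + ↑(l + 2 ^ (d + 1 + 1) - 2)) 2
          = ((l + 2 ^ (d + 1) - 1 : Nat) : Int) := by
        rw [PySem.Int.floordiv_eq_ediv_of_pos (by norm_num)]
        omega
      have hml : ((l + 2 ^ (d + 1) - 1 : Nat) : Int) - 1 = ↑(l + 2 ^ (d + 1) - 2) := by omega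
      have hmr : ((l + 2 ^ (d + 1) - 1 : Nat) : Int) + 1 = ↑(l + 2 ^ (d + 1)) := by omega
      have hrr : (↑(l + 2 ^ (d + 1 + 1) - 2) : Int) = ↑((l + 2 ^ (d + 1)) + 2 ^ (d + 1) - 2) := by
        omega
      rw [pvCheck]
      simp only [if_neg hne, hm, hml, hmr]
      rw [hrr]
      rw [ih l (lvl + 1) f (by omega) (by omega) (by omega),
          ih (l + 2 ^ (d + 1)) (lvl + 1) f (by omega) (by omega) (by omega)]
      have hlvl1 : decide ((lvl + 1) ≠ 0) = true := by simp; omega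
      have hmid : PySem.List.pyGetD s ((l + 2 ^ (d + 1) - 1 : Nat) : Int) ' '
          = s.getD (l + 2 ^ (d + 1) - 1) ' ' := PySem.List.pyGetD_natCast ..
      simp only [pvB, hlvl1, Bool.true_or, Bool.and_true, hmid]
      -- child root indices
      have hil : l + 2 ^ d - 1 = (l + 2 ^ (d + 1) - 1) - 2 ^ d := by omega
      have hir : l + 2 ^ (d + 1) + 2 ^ d - 1 = (l + 2 ^ (d + 1) - 1) + 2 ^ d := by omega
      simp only [pvGS, pvP, ← hil]
      have hir' : (l + 2 ^ (d + 1) - 1) + 2 ^ d = l + 2 ^ (d + 1) + 2 ^ d - 1 := by omega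
      rw [hir']
      cases hGL : pvGS s d l <;> cases hGR : pvGS s d (l + 2 ^ (d + 1)) <;>
        cases hc : (s.getD (l + 2 ^ (d + 1) - 1) ' ' == '0') <;>
          cases hcl : (s.getD (l + 2 ^ d - 1) ' ' == '0') <;>
            cases hcr : (s.getD (l + 2 ^ (d + 1) + 2 ^ d - 1) ' ' == '0') <;>
              by_cases hl0 : lvl = 0 <;>
                simp [hl0]

theorem pvInner_all (s : List Char) (h : Int) : ∀ is : List Int,
    pvInner s h is = is.all (fun i => !(PySem.List.pyGetD s i ' ' == '0') ||
      (PySem.List.pyGetD s (i - h) ' ' == '0' && PySem.List.pyGetD s (i + h) ' ' == '0')) := by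
  intro is
  induction is with
  | nil => rfl
  | cons i rest ih =>
    simp only [pvInner, List.all_cons, ← ih]
    cases h1 : (PySem.List.pyGetD s i ' ' == '0') <;>
      cases h2 : (PySem.List.pyGetD s (i - h) ' ' == '0') <;>
        cases h3 : (PySem.List.pyGetD s (i + h) ' ' == '0') <;> simp

theorem pvInner_level (s : List Char) (K t : Nat) (h1 : 1 ≤ t) (h2 : t < K) :
    pvInner s ((2 ^ (t - 1) : Nat) : Int)
        (PySem.List.pyRange ((2 ^ t - 1 : Nat) : Int) ((2 ^ K - 1 : Nat) : Int) ((2 ^ (t + 1) : Nat) : Int))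
      = decide (∀ j : Nat, j < 2 ^ (K - 1 - t) →
          pvP s (2 ^ (t - 1)) (2 ^ t - 1 + j * 2 ^ (t + 1)) = true) := by
  have hps : (0 : Int) < ((2 ^ (t + 1) : Nat) : Int) := by positivity
  rw [pvInner_all, PySem.List.pyRange_of_pos _ _ hps]
  have hlt : ((2 ^ t - 1 : Nat) : Int) < ((2 ^ K - 1 : Nat) : Int) := by
    have := Nat.pow_lt_pow_right (a := 2) (by omega) h2
    have h1p : 1 ≤ 2 ^ t := Nat.one_le_two_pow
    omega
  rw [if_pos hlt]
  have hcnt : ((((2 ^ K - 1 : Nat) : Int) - ((2 ^ t - 1 : Nat) : Int) + ((2 ^ (t + 1) : Nat) : Int) - 1)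
      / ((2 ^ (t + 1) : Nat) : Int)).toNat = 2 ^ (K - 1 - t) := by
    have h1p : 1 ≤ 2 ^ t := Nat.one_le_two_pow
    have h1p' : 1 ≤ 2 ^ (t + 1) := Nat.one_le_two_pow
    have htK : 2 ^ t ≤ 2 ^ K := Nat.pow_le_pow_right (by omega) (by omega)
    have hnum : (((2 ^ K - 1 : Nat) : Int) - ((2 ^ t - 1 : Nat) : Int) + ((2 ^ (t + 1) : Nat) : Int) - 1)
        = ((2 ^ K - 2 ^ t + 2 ^ (t + 1) - 1 : Nat) : Int) := by omega
    rw [hnum, ← Int.natCast_div, Int.toNat_natCast]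
    have hsplit : 2 ^ K = 2 ^ (K - 1 - t) * 2 ^ (t + 1) := by
      rw [← pow_add]; congr 1; omega
    have h2' : 2 ^ t ≤ 2 ^ (t + 1) := by
      have : 2 ^ (t + 1) = 2 ^ t + 2 ^ t := by ring
      omega
    have hlow : 2 ^ K - 2 ^ t + 2 ^ (t + 1) - 1
        = 2 ^ (K - 1 - t) * 2 ^ (t + 1) + (2 ^ (t + 1) - 2 ^ t - 1) := by omega
    rw [hlow, mul_comm, Nat.mul_add_div (by positivity)]
    have hz : (2 ^ (t + 1) - 2 ^ t - 1) / 2 ^ (t + 1) = 0 := Nat.div_eq_of_lt (by omega)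
    omega
  rw [hcnt, List.all_map]
  have hht : 2 ^ (t - 1) ≤ 2 ^ t - 1 := by
    have he : 2 ^ t = 2 ^ (t - 1) + 2 ^ (t - 1) := by
      rw [← two_mul, ← pow_succ']; congr 1; omega
    have h1p : 1 ≤ 2 ^ (t - 1) := Nat.one_le_two_pow
    omega
  have key : ∀ j : Nat,
      (!(PySem.List.pyGetD s (((2 ^ t - 1 : Nat) : Int) + ((2 ^ (t + 1) : Nat) : Int) * (j : Int)) ' ' == '0') ||
       (PySem.List.pyGetD s (((2 ^ t - 1 : Nat) : Int) + ((2 ^ (t + 1) : Nat) : Int) * (j : Int) - ((2 ^ (t - 1) : Nat) : Int)) ' ' == '0' &&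
        PySem.List.pyGetD s (((2 ^ t - 1 : Nat) : Int) + ((2 ^ (t + 1) : Nat) : Int) * (j : Int) + ((2 ^ (t - 1) : Nat) : Int)) ' ' == '0'))
      = pvP s (2 ^ (t - 1)) (2 ^ t - 1 + j * 2 ^ (t + 1)) := by
    intro j
    have e1 : ((2 ^ t - 1 : Nat) : Int) + ((2 ^ (t + 1) : Nat) : Int) * (j : Int)
        = ((2 ^ t - 1 + j * 2 ^ (t + 1) : Nat) : Int) := by
      rw [Nat.cast_add, Nat.cast_mul]; ring
    have e2 : ((2 ^ t - 1 : Nat) : Int) + ((2 ^ (t + 1) : Nat) : Int) * (j : Int) - ((2 ^ (t - 1) : Nat) : Int)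
        = ((2 ^ t - 1 + j * 2 ^ (t + 1) - 2 ^ (t - 1) : Nat) : Int) := by
      rw [e1, ← Nat.cast_sub (by omega)]
    have e3 : ((2 ^ t - 1 : Nat) : Int) + ((2 ^ (t + 1) : Nat) : Int) * (j : Int) + ((2 ^ (t - 1) : Nat) : Int)
        = ((2 ^ t - 1 + j * 2 ^ (t + 1) + 2 ^ (t - 1) : Nat) : Int) := by
      rw [e1, ← Nat.cast_add]
    rw [e2, e3, e1]
    simp only [PySem.List.pyGetD_natCast, pvP]
  rw [Bool.eq_iff_iff, List.all_eq_true, decide_eq_true_iff]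
  constructor
  · intro hall j hj
    have h := hall _ (List.mem_range.mpr hj)
    rw [← key j]
    exact h
  · intro hall x hx
    have h := hall x (List.mem_range.mp hx)
    rw [← key x] at h
    exact h

theorem pvOuter_eq (s : List Char) (K : Nat) : ∀ (fuel t : Nat) (ok : Bool), 1 ≤ t → K ≤ t + fuel →
    pvOuter s ((2 ^ K - 1 : Nat) : Int) fuel ok ((2 ^ (t - 1) : Nat) : Int)
      = (ok && decide (∀ t' : Nat, t' < K → t ≤ t' → ∀ j : Nat, j < 2 ^ (K - 1 - t') →
          pvP s (2 ^ (t' - 1)) (2 ^ t' - 1 + j * 2 ^ (t' + 1)) = true)) := by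
  intro fuel
  induction fuel with
  | zero =>
    intro t ok h1 hK
    have hd : decide (∀ t' : Nat, t' < K → t ≤ t' → ∀ j : Nat, j < 2 ^ (K - 1 - t') →
        pvP s (2 ^ (t' - 1)) (2 ^ t' - 1 + j * 2 ^ (t' + 1)) = true) = true := by
      rw [decide_eq_true_iff]; intro t' ha hb; omega
    rw [hd, pvOuter, Bool.and_true]
  | succ fuel ih =>
    intro t ok h1 hK
    have hpt : 2 ^ t = 2 * 2 ^ (t - 1) := by rw [← pow_succ']; congr 1; omega
    have h2h : 2 * ((2 ^ (t - 1) : Nat) : Int) = ((2 ^ t : Nat) : Int) := by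
      rw [hpt]; push_cast; ring
    cases ok with
    | false => simp [pvOuter]
    | true =>
      by_cases htK : t < K
      · have hcond : decide (2 * ((2 ^ (t - 1) : Nat) : Int) ≤ ((2 ^ K - 1 : Nat) : Int)) = true := by
          rw [h2h, decide_eq_true_iff]
          have := Nat.pow_lt_pow_right (a := 2) (le_refl 2) htK
          have h1p : 1 ≤ 2 ^ t := Nat.one_le_two_pow
          omega
        rw [pvOuter, hcond]
        simp only [Bool.true_and, if_true]
        have e1 : 2 * ((2 ^ (t - 1) : Nat) : Int) - 1 = ((2 ^ t - 1 : Nat) : Int) := by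
          rw [h2h]
          have h1p : 1 ≤ 2 ^ t := Nat.one_le_two_pow
          omega
        have e2 : 4 * ((2 ^ (t - 1) : Nat) : Int) = ((2 ^ (t + 1) : Nat) : Int) := by
          have : 2 ^ (t + 1) = 4 * 2 ^ (t - 1) := by
            rw [show t + 1 = (t - 1) + 2 by omega, pow_add]; ring
          rw [this]; push_cast; ring
        have e3 : 2 * ((2 ^ (t - 1) : Nat) : Int) = ((2 ^ (t + 1 - 1) : Nat) : Int) := by
          rw [h2h]; norm_num
        rw [e1, e2, pvInner_level s K t h1 htK, e3,
            ih (t + 1) _ (by omega) (by omega)]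
        rw [Bool.eq_iff_iff, Bool.and_eq_true]
        simp only [decide_eq_true_iff]
        constructor
        · rintro ⟨hlev, htail⟩ t' ha hb j hj
          rcases Nat.eq_or_lt_of_le hb with rfl | hlt
          · exact hlev j hj
          · exact htail t' ha (by omega) j hj
        · intro hall
          exact ⟨fun j hj => hall t htK (le_refl t) j hj,
                 fun t' ha hb j hj => hall t' ha (by omega) j hj⟩
      · have hcond : decide (2 * ((2 ^ (t - 1) : Nat) : Int) ≤ ((2 ^ K - 1 : Nat) : Int)) = false := by
          rw [h2h, decide_eq_false_iff_not]
          have hKt : 2 ^ K ≤ 2 ^ t := Nat.pow_le_pow_right (by omega) (by omega)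
          have h1p : 1 ≤ 2 ^ K := Nat.one_le_two_pow
          omega
        rw [pvOuter, hcond]
        have hd : decide (∀ t' : Nat, t' < K → t ≤ t' → ∀ j : Nat, j < 2 ^ (K - 1 - t') →
            pvP s (2 ^ (t' - 1)) (2 ^ t' - 1 + j * 2 ^ (t' + 1)) = true) = true := by
          rw [decide_eq_true_iff]; intro t' ha hb; omega
        simp [hd]

theorem pvElem_eq (t : List Char) (K : Nat) (hK : 1 ≤ K) (hlen : t.length = 2 ^ K - 1) :
    (if (pvCheck t t.length 0 ((t.length : Int) - 1) 0).1 then (1 : Int) else 0) =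
    (if pvOuter t (t.length : Int) t.length
        (!(decide (1 < (t.length : Int)) &&
           (PySem.List.pyGetD t (PySem.Int.floordiv (t.length : Int) 2) ' ' == '0'))) 1
     then (1 : Int) else 0) := by
  have hKp : K < 2 ^ K := Nat.lt_two_pow_self
  have hpd : 2 ^ K = 2 ^ (K - 1) + 2 ^ (K - 1) := by
    rw [← two_mul, ← pow_succ']; congr 1; omega
  have h1p : 1 ≤ 2 ^ (K - 1) := Nat.one_le_two_pow
  -- A side
  have eArg : (t.length : Int) - 1 = ((0 + 2 ^ ((K - 1) + 1) - 2 : Nat) : Int) := by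
    rw [hlen]; have : (K - 1) + 1 = K := by omega
    rw [this]; omega
  have hA := pvCheck_eq t (K - 1) 0 0 t.length
    (by rw [hlen]; omega) (le_refl 0)
    (by have e : 2 ^ ((K - 1) + 1) = 2 ^ K := by congr 1; omega
        rw [hlen, e]; omega)
  rw [Nat.cast_zero] at hA
  rw [eArg, hA]
  -- B side
  have eMid : PySem.Int.floordiv (t.length : Int) 2 = ((2 ^ (K - 1) - 1 : Nat) : Int) := by
    rw [PySem.Int.floordiv_eq_ediv_of_pos (by norm_num), hlen]
    omega
  have eN : (t.length : Int) = ((2 ^ K - 1 : Nat) : Int) := by rw [hlen]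
  rw [eMid, PySem.List.pyGetD_natCast, eN]
  have hO := pvOuter_eq t K t.length 1
    (!(decide (1 < ((2 ^ K - 1 : Nat) : Int)) && (t.getD (2 ^ (K - 1) - 1) ' ' == '0')))
    (le_refl 1) (by rw [hlen]; omega)
  rw [show ((2 ^ (1 - 1) : Nat) : Int) = (1 : Int) from by norm_num] at hO
  rw [hO]
  -- identify the two bools
  have hGS : pvGS t (K - 1) 0
      = decide (∀ t' : Nat, t' < K → 1 ≤ t' → ∀ j : Nat, j < 2 ^ (K - 1 - t') →
          pvP t (2 ^ (t' - 1)) (2 ^ t' - 1 + j * 2 ^ (t' + 1)) = true) := by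
    rw [Bool.eq_iff_iff, decide_eq_true_iff, pvGS_iff]
    constructor
    · intro hall t' ha hb j hj
      have := hall t' j hb (by omega) hj
      rw [Nat.zero_add] at this
      exact this
    · intro hall t' j ha hb hj
      have := hall t' (by omega) ha j hj
      rw [Nat.zero_add]
      exact this
  have hGuard : (decide ((0:Int) ≠ 0) || decide (K - 1 = 0) || !(t.getD (0 + 2 ^ (K - 1) - 1) ' ' == '0'))
      = !(decide (1 < ((2 ^ K - 1 : Nat) : Int)) && (t.getD (2 ^ (K - 1) - 1) ' ' == '0')) := by
    rw [Nat.zero_add]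
    have hz : decide ((0:Int) ≠ 0) = false := by simp
    by_cases hk1 : K - 1 = 0
    · have hk : K = 1 := by omega
      subst hk
      simp
    · have h4 : 4 ≤ 2 ^ K := by
        calc (4:Nat) = 2 ^ 2 := rfl
        _ ≤ 2 ^ K := Nat.pow_le_pow_right (by omega) (by omega)
      have hd1 : decide (K - 1 = 0) = false := by simp [hk1]
      have hd2 : decide (1 < ((2 ^ K - 1 : Nat) : Int)) = true := by
        rw [decide_eq_true_iff]; omega
      rw [hz, hd1, hd2, Bool.false_or, Bool.false_or, Bool.true_and]
  simp only [pvB, hGS, hGuard]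
  rw [Bool.and_comm]

theorem pvShape (n : Int) (t : List Char) (h : make_binary_tree n = some t) :
    ∃ K : Nat, 1 ≤ K ∧ t.length = 2 ^ K - 1 := by
  unfold make_binary_tree at h
  generalize pvBinTail n = bn at h
  simp only [pvPadTree] at h
  split_ifs at h with h1 h2 h3 h4 h5 h6 <;> simp only [Option.some.injEq] at h <;> subst h
  · exact ⟨1, by omega, by rw [PySem.Chars.length_zfill]; omega⟩
  · exact ⟨2, by omega, by rw [PySem.Chars.length_zfill]; omega⟩
  · exact ⟨3, by omega, by rw [PySem.Chars.length_zfill]; omega⟩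
  · exact ⟨4, by omega, by rw [PySem.Chars.length_zfill]; omega⟩
  · exact ⟨5, by omega, by rw [PySem.Chars.length_zfill]; omega⟩
  · exact ⟨6, by omega, by rw [PySem.Chars.length_zfill]; omega⟩

-- ===== VERDICT (by name: the statement is the Claim_ definition above) =====

theorem solution_spec : Claim_equal_solution := by
  intro numbers _
  unfold Spec_solution solution solution_alt
  congr 1
  funext ans n
  cases hmb : make_binary_tree n with
  | none => rfl
  | some t =>
    obtain ⟨K, hK, hlen⟩ := pvShape n t hmb
    exact congrArg (fun x => ans ++ [x]) (pvElem_eq t K hK hlen)
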